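-- pv_equiv track=rewrite | github.com/mdncv/my_first_lib | my_first_lib.py | matrix_counterclockwise
-- ===== SOURCE A (Python) =====
-- from typing import Iterable
--
-- def transpose(matrix: Iterable[Iterable[int]]) -> list[Iterable[int]]:
--     """Транспонирование матрицу."""
--     return list(zip(*matrix))
--
-- def matrix_counterclockwise(matrix: list[Iterable[int]]) -> list[int]:
--     """
--     "Разворачивает" матрицу против часовой стрелки.
--     """
--     new_list = []
--     matrix = transpose(matrix)  # возможность обходить по часовой стрелке
--     while matrix:
--         first_row, *matrix = matrix  # "срезается" верхняя строка матрицы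
--         new_list.extend(first_row)
--         matrix = transpose(
--             matrix
--         )  # оставшаяся часть матрицы транспонируется
--         matrix.reverse()  # и отображается
--     return new_list
-- ===== SOURCE B (Python) =====
-- def matrix_counterclockwise(matrix):
--     """
--     "Разворачивает" матрицу против часовой стрелки.
--
--     Boundary-pointer traversal: each cell is visited once via direct
--     indexing instead of repeatedly transposing the remaining matrix.
--     Only the first k columns are traversed, k = shortest row length
--     (the zip-* semantics of ragged input).
--     """
--     if not matrix:
--         return []
--     k = min(len(row) for row in matrix)
--     out = []
--     t, b, l, r = 0, len(matrix) - 1, 0, k - 1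
--     o = 0
--     while t <= b and l <= r:
--         if o == 0:
--             out += [matrix[i][l] for i in range(t, b + 1)]
--             l += 1
--         elif o == 1:
--             out += [matrix[b][j] for j in range(l, r + 1)]
--             b -= 1
--         elif o == 2:
--             out += [matrix[i][r] for i in range(b, t - 1, -1)]
--             r -= 1
--         else:
--             out += [matrix[t][j] for j in range(r, l - 1, -1)]
--             t += 1
--         o = (o + 1) % 4
--     return out
-- ===== Notes on version B (the rewrite author's own statement) =====
-- stated objective: faster
-- what changed: Replaced the repeated transpose-and-reverse peeling (a full transpose of the remaining matrix per peeled line) by a single boundary-pointer spiral walk that reads each cell once by direct indexing.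
import Mathlib
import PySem

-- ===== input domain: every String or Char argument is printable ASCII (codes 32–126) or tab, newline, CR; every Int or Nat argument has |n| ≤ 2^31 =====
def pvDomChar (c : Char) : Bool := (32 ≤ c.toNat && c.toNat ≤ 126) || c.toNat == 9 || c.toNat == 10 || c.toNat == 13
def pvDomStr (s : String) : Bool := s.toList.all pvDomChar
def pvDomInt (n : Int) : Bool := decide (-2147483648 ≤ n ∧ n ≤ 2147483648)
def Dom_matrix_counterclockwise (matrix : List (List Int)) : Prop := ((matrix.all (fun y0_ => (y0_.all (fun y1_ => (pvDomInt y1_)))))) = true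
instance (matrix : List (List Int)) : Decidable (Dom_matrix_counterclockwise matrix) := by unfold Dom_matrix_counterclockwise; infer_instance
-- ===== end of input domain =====

-- B replaces A's repeated transpose-and-reverse peeling by a single boundary-pointer
-- spiral walk that reads each cell once by direct indexing (asymptotically faster).

-- ===== PORT A =====
-- transpose(matrix) = list(zip(*matrix)): emit the heads while no row is exhausted
-- (zip truncates at the shortest row; zip of no iterables is empty).
def pyTransposeGo : Nat -> List (List Int) -> List (List Int)
  | 0, _ => []
  | f + 1, m =>
    if m = [] ∨ m.any (fun r => r.isEmpty) then []
    else (m.map (fun r => r.headD 0)) :: pyTransposeGo f (m.map (fun r => r.tail))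

def pyTranspose (m : List (List Int)) : List (List Int) :=
  pyTransposeGo ((m.headD []).length + 1) m

-- the while loop of A; fuel is only a totality device (always ample, see the proofs)
def gLoop : Nat → List (List Int) → List Int
  | _, [] => []
  | 0, _ :: _ => []
  | f + 1, first :: rest => first ++ gLoop f ((pyTranspose rest).reverse)

def matrix_counterclockwise (matrix : List (List Int)) : List Int :=
  gLoop (matrix.length + (matrix.map List.length).sum + 1) (pyTranspose matrix)

-- ===== PORT B =====
-- matrix[i][j]; every access B makes is in range, so the defaults are never used
def pyGetIJ (M : List (List Int)) (i j : Int) : Int :=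
  PySem.List.pyGetD (PySem.List.pyGetD M i []) j 0

def bLoop (M : List (List Int)) : Nat -> List Int -> Int -> Int -> Int -> Int -> Int -> List Int
  | 0, out, _, _, _, _, _ => out
  | f + 1, out, t, b, l, r, o =>
    if t ≤ b ∧ l ≤ r then
      if o == 0 then
        bLoop M f (out ++ (PySem.List.pyRange t (b + 1) 1).map (fun i => pyGetIJ M i l))
          t b (l + 1) r (PySem.Int.mod (o + 1) 4)
      else if o == 1 then
        bLoop M f (out ++ (PySem.List.pyRange l (r + 1) 1).map (fun j => pyGetIJ M b j))
          t (b - 1) l r (PySem.Int.mod (o + 1) 4)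
      else if o == 2 then
        bLoop M f (out ++ (PySem.List.pyRange b (t - 1) (-1)).map (fun i => pyGetIJ M i r))
          t b l (r - 1) (PySem.Int.mod (o + 1) 4)
      else
        bLoop M f (out ++ (PySem.List.pyRange r (l - 1) (-1)).map (fun j => pyGetIJ M t j))
          (t + 1) b l r (PySem.Int.mod (o + 1) 4)
    else out

def matrix_counterclockwise_alt (matrix : List (List Int)) : List Int :=
  if matrix.isEmpty then []
  else
    let k := (PySem.List.min? (matrix.map (fun row : List Int => (row.length : Int)))
      (fun x => x)).getD 0
    bLoop matrix (((matrix.length : Int) + k).toNat + 1) [] 0 ((matrix.length : Int) - 1) 0 (k - 1) 0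

-- ===== PRECONDITION & SPEC =====
def Spec_matrix_counterclockwise (matrix : List (List Int)) (out : List Int) : Prop := out = matrix_counterclockwise_alt matrix
instance (matrix : List (List Int)) (out : List Int) : Decidable (Spec_matrix_counterclockwise matrix out) := by unfold Spec_matrix_counterclockwise; infer_instance

-- ===== CLAIM (what is proved, stated in full; the proofs are below) =====
def Claim_equal_matrix_counterclockwise : Prop := ∀ (matrix : List (List Int)), Dom_matrix_counterclockwise matrix → Spec_matrix_counterclockwise matrix (matrix_counterclockwise matrix)

-- ===== LEMMAS AND PROOFS =====

-- index ranges: l..r ascending, t..b descending (the forms the B port's range calls take)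
def upr (a b : Int) : List Int := PySem.List.pyRange a (b + 1) 1
def dnr (a b : Int) : List Int := PySem.List.pyRange b (a - 1) (-1)

-- the rectangular window [t..b] x [l..r] of M in one of the four orientations A's
-- peeling passes through (0: columns l..r read downwards; 1: rows b..t read rightwards;
-- 2: columns r..l read upwards; 3: rows t..b read leftwards)
def view (M : List (List Int)) (o t b l r : Int) : List (List Int) :=
  if o = 0 then (upr l r).map (fun c => (upr t b).map (fun i => pyGetIJ M i c))
  else if o = 1 then (dnr t b).map (fun i => (upr l r).map (fun c => pyGetIJ M i c))
  else if o = 2 then (dnr l r).map (fun c => (dnr t b).map (fun i => pyGetIJ M i c))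
  else (upr t b).map (fun i => (dnr l r).map (fun c => pyGetIJ M i c))

theorem upr_nil {l r : Int} (h : r < l) : upr l r = [] :=
  PySem.List.pyRange_one_eq_nil (by omega)

theorem upr_cons {l r : Int} (h : l ≤ r) : upr l r = l :: upr (l + 1) r :=
  PySem.List.pyRange_one_cons (by omega)

theorem upr_ne_nil {l r : Int} (h : l ≤ r) : upr l r ≠ [] := by
  rw [upr_cons h]; simp

theorem dnr_nil {t b : Int} (h : b < t) : dnr t b = [] :=
  PySem.List.pyRange_neg_one_eq_nil (by omega)

theorem dnr_cons {t b : Int} (h : t ≤ b) : dnr t b = b :: dnr t (b - 1) := by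
  unfold dnr
  rw [PySem.List.pyRange_neg_one_cons (by omega)]

theorem dnr_ne_nil {t b : Int} (h : t ≤ b) : dnr t b ≠ [] := by
  rw [dnr_cons h]; simp

theorem upr_reverse (a b : Int) : (upr a b).reverse = dnr a b := by
  unfold upr dnr
  rw [PySem.List.pyRange_neg_one_eq_reverse]
  congr 2
  omega

theorem dnr_reverse (a b : Int) : (dnr a b).reverse = upr a b := by
  rw [← upr_reverse, List.reverse_reverse]

theorem view0 (M : List (List Int)) (t b l r : Int) :
    view M 0 t b l r = (upr l r).map (fun c => (upr t b).map (fun i => pyGetIJ M i c)) := by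
  simp [view]

theorem view1 (M : List (List Int)) (t b l r : Int) :
    view M 1 t b l r = (dnr t b).map (fun i => (upr l r).map (fun c => pyGetIJ M i c)) := by
  norm_num [view]

theorem view2 (M : List (List Int)) (t b l r : Int) :
    view M 2 t b l r = (dnr l r).map (fun c => (dnr t b).map (fun i => pyGetIJ M i c)) := by
  norm_num [view]

theorem view3 (M : List (List Int)) (t b l r : Int) :
    view M 3 t b l r = (upr t b).map (fun i => (dnr l r).map (fun c => pyGetIJ M i c)) := by
  norm_num [view]

theorem pyTransposeGo_congr : ∀ (f g : Nat) (m : List (List Int)),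
    (m.headD []).length < f → (m.headD []).length < g →
    pyTransposeGo f m = pyTransposeGo g m := by
  intro f
  induction f with
  | zero => intro g m hf _; omega
  | succ f ihf =>
    intro g m hf hg
    cases g with
    | zero => omega
    | succ g =>
      simp only [pyTransposeGo]
      by_cases hc : m = [] ∨ m.any (fun r => r.isEmpty)
      · rw [if_pos hc, if_pos hc]
      · rw [if_neg hc, if_neg hc]
        congr 1
        obtain ⟨hne, hall⟩ := not_or.mp hc
        cases m with
        | nil => exact absurd rfl hne
        | cons a as =>
          have ha : a ≠ [] := by
            intro h0
            exact hall (by simp [h0])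
          have hlen : 0 < a.length := List.length_pos_iff.mpr ha
          apply ihf
          · simp only [List.map_cons, List.headD_cons, List.length_tail]
            simp only [List.headD_cons] at hf
            omega
          · simp only [List.map_cons, List.headD_cons, List.length_tail]
            simp only [List.headD_cons] at hg
            omega

-- the one-step unfolding of A's transpose (the fuel in pyTranspose is always ample)
theorem pyTranspose_eq (m : List (List Int)) :
    pyTranspose m = if m = [] ∨ m.any (fun r => r.isEmpty) then []
      else (m.map (fun r => r.headD 0)) :: pyTranspose (m.map (fun r => r.tail)) := by
  by_cases hc : m = [] ∨ m.any (fun r => r.isEmpty)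
  · rw [if_pos hc]
    unfold pyTranspose
    conv_lhs => rw [pyTransposeGo]
    rw [if_pos hc]
  · rw [if_neg hc]
    unfold pyTranspose
    conv_lhs => rw [pyTransposeGo]
    rw [if_neg hc]
    congr 1
    obtain ⟨hne, hall⟩ := not_or.mp hc
    cases m with
    | nil => exact absurd rfl hne
    | cons a as =>
      have ha : a ≠ [] := by
        intro h0
        exact hall (by simp [h0])
      have hlen : 0 < a.length := List.length_pos_iff.mpr ha
      apply pyTransposeGo_congr
      · simp only [List.map_cons, List.headD_cons, List.length_tail]
        omega
      · simp only [List.map_cons, List.headD_cons, List.length_tail]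
        omega

theorem pyTranspose_nil : pyTranspose [] = [] := by
  rw [pyTranspose_eq]; simp

theorem gLoop_nil (f : Nat) : gLoop f [] = [] := by cases f <;> rfl

theorem gLoop_empty (f : Nat) (m : List (List Int)) (h : ∀ row ∈ m, row = []) :
    gLoop f m = [] := by
  cases f with
  | zero => cases m <;> rfl
  | succ f =>
    cases m with
    | nil => rfl
    | cons first rest =>
      have h1 : first = [] := h first (by simp)
      have h2 : pyTranspose rest = [] := by
        cases rest with
        | nil => exact pyTranspose_nil
        | cons r rs =>
          rw [pyTranspose_eq]
          apply if_pos
          refine Or.inr ?_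
          have : r = [] := h r (by simp)
          simp [this]
      simp [gLoop, h1, h2, gLoop_nil]

theorem view_empty (M : List (List Int)) (o t b l r : Int) (h : b < t ∨ r < l) :
    ∀ row ∈ view M o t b l r, row = [] := by
  intro row hrow
  unfold view at hrow
  split_ifs at hrow <;>
    simp only [List.mem_map] at hrow <;>
    obtain ⟨c, hc1, hc2⟩ := hrow <;>
    rcases h with h | h <;>
    first
      | (rw [← hc2, upr_nil h, List.map_nil])
      | (rw [← hc2, dnr_nil h, List.map_nil])
      | (rw [upr_nil h] at hc1; cases hc1)
      | (rw [dnr_nil h] at hc1; cases hc1)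

-- zip-* of a matrix written as "for x in xs: the row [f x y for y in ys]" is
-- "for y in ys: the column [f x y for x in xs]" (xs nonempty)
theorem transpose_map_map (xs ys : List Int) (f : Int → Int → Int) (hxs : xs ≠ []) :
    pyTranspose (xs.map (fun x => ys.map (fun y => f x y))) =
      ys.map (fun y => xs.map (fun x => f x y)) := by
  induction ys with
  | nil =>
    cases xs with
    | nil => exact absurd rfl hxs
    | cons x xs' =>
      rw [pyTranspose_eq]
      apply if_pos
      exact Or.inr (by simp)
  | cons y ys ih =>
    have hcond : ¬((xs.map fun x => (y :: ys).map (f x)) = [] ∨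
        ((xs.map fun x => (y :: ys).map (f x)).any (fun r => r.isEmpty)) = true) := by
      rintro (hnil | hany)
      · exact hxs (by simpa using hnil)
      · obtain ⟨rr, hrr, hE⟩ := List.any_eq_true.mp hany
        obtain ⟨x, _, rfl⟩ := List.mem_map.mp hrr
        simp at hE
    rw [pyTranspose_eq, if_neg hcond]
    simp only [List.map_map, List.map_cons, Function.comp_def, List.headD_cons, List.tail_cons]
    rw [ih]

theorem bLoop_stop (M : List (List Int)) (f : Nat) (out : List Int) (t b l r o : Int)
    (h : ¬(t ≤ b ∧ l ≤ r)) : bLoop M f out t b l r o = out := by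
  cases f with
  | zero => rfl
  | succ f => simp only [bLoop]; rw [if_neg h]

-- one unfolding of A's loop per emitted side of B, in each orientation
theorem bLoop_eq_gLoop (M : List (List Int)) :
    ∀ (fA fB : Nat) (t b l r o : Int) (out : List Int),
      (o = 0 ∨ o = 1 ∨ o = 2 ∨ o = 3) →
      ((b + 1 - t) + (r + 1 - l)).toNat + 1 ≤ fA →
      ((b + 1 - t) + (r + 1 - l)).toNat + 1 ≤ fB →
      bLoop M fB out t b l r o = out ++ gLoop fA (view M o t b l r) := by
  intro fA
  induction fA with
  | zero => intro fB t b l r o out _ hf _; omega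
  | succ f ih =>
    intro fB t b l r o out ho hf hfB
    obtain ⟨fB', rfl⟩ : ∃ fB', fB = fB' + 1 := ⟨fB - 1, by omega⟩
    by_cases hc : t ≤ b ∧ l ≤ r
    · obtain ⟨h1, h2⟩ := hc
      rcases ho with rfl | rfl | rfl | rfl
      · -- o = 0 : emit column l downwards
        simp only [bLoop]
        rw [if_pos ⟨h1, h2⟩, if_pos (by decide : (((0:Int)) == 0) = true),
          show PySem.Int.mod ((0:Int) + 1) 4 = 1 by decide]
        rw [view0, upr_cons h2, List.map_cons]
        simp only [gLoop]
        by_cases hlr : l < r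
        · have h' := transpose_map_map (upr (l + 1) r) (upr t b)
            (fun c i => pyGetIJ M i c) (upr_ne_nil (by omega))
          simp only at h'
          rw [h', ← List.map_reverse, upr_reverse, ← view1]
          rw [ih fB' t b (l + 1) r 1 _ (by simp) (by omega) (by omega)]
          simp [upr]
        · rw [upr_nil (by omega : r < l + 1), List.map_nil, pyTranspose_nil]
          simp only [List.reverse_nil, gLoop_nil, List.append_nil]
          rw [bLoop_stop M fB' _ _ _ _ _ _ (by omega)]
          simp [upr]
      · -- o = 1 : emit row b rightwards
        simp only [bLoop]
        rw [if_pos ⟨h1, h2⟩, if_neg (by decide : ¬(((1:Int)) == 0) = true),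
          if_pos (by decide : (((1:Int)) == 1) = true),
          show PySem.Int.mod ((1:Int) + 1) 4 = 2 by decide]
        rw [view1, dnr_cons h1, List.map_cons]
        simp only [gLoop]
        by_cases htb : t < b
        · have h' := transpose_map_map (dnr t (b - 1)) (upr l r)
            (fun i c => pyGetIJ M i c) (dnr_ne_nil (by omega))
          simp only at h'
          rw [h', ← List.map_reverse, upr_reverse, ← view2]
          rw [ih fB' t (b - 1) l r 2 _ (by simp) (by omega) (by omega)]
          simp [upr]
        · rw [dnr_nil (by omega : b - 1 < t), List.map_nil, pyTranspose_nil]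
          simp only [List.reverse_nil, gLoop_nil, List.append_nil]
          rw [bLoop_stop M fB' _ _ _ _ _ _ (by omega)]
          simp [upr]
      · -- o = 2 : emit column r upwards
        simp only [bLoop]
        rw [if_pos ⟨h1, h2⟩, if_neg (by decide : ¬(((2:Int)) == 0) = true),
          if_neg (by decide : ¬(((2:Int)) == 1) = true),
          if_pos (by decide : (((2:Int)) == 2) = true),
          show PySem.Int.mod ((2:Int) + 1) 4 = 3 by decide]
        rw [view2, dnr_cons h2, List.map_cons]
        simp only [gLoop]
        by_cases hlr : l < r
        · have h' := transpose_map_map (dnr l (r - 1)) (dnr t b)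
            (fun c i => pyGetIJ M i c) (dnr_ne_nil (by omega))
          simp only at h'
          rw [h', ← List.map_reverse, dnr_reverse, ← view3]
          rw [ih fB' t b l (r - 1) 3 _ (by simp) (by omega) (by omega)]
          simp [dnr]
        · rw [dnr_nil (by omega : r - 1 < l), List.map_nil, pyTranspose_nil]
          simp only [List.reverse_nil, gLoop_nil, List.append_nil]
          rw [bLoop_stop M fB' _ _ _ _ _ _ (by omega)]
          simp [dnr]
      · -- o = 3 : emit row t leftwards
        simp only [bLoop]
        rw [if_pos ⟨h1, h2⟩, if_neg (by decide : ¬(((3:Int)) == 0) = true),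
          if_neg (by decide : ¬(((3:Int)) == 1) = true),
          if_neg (by decide : ¬(((3:Int)) == 2) = true),
          show PySem.Int.mod ((3:Int) + 1) 4 = 0 by decide]
        rw [view3, upr_cons h1, List.map_cons]
        simp only [gLoop]
        by_cases htb : t < b
        · have h' := transpose_map_map (upr (t + 1) b) (dnr l r)
            (fun i c => pyGetIJ M i c) (upr_ne_nil (by omega))
          simp only at h'
          rw [h', ← List.map_reverse, dnr_reverse, ← view0]
          rw [ih fB' (t + 1) b l r 0 _ (by simp) (by omega) (by omega)]
          simp [dnr]
        · rw [upr_nil (by omega : b < t + 1), List.map_nil, pyTranspose_nil]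
          simp only [List.reverse_nil, gLoop_nil, List.append_nil]
          rw [bLoop_stop M fB' _ _ _ _ _ _ (by omega)]
          simp [dnr]
    · rw [bLoop_stop M (fB' + 1) _ _ _ _ _ _ hc,
        gLoop_empty (f + 1) _ (view_empty M _ t b l r (by omega)), List.append_nil]

-- zip-* of any nonempty matrix: K columns (K = shortest row length), column c
-- holding the c-th entry of every row
theorem transpose_cols : ∀ (K : Nat) (m : List (List Int)), m ≠ [] →
    (∀ row ∈ m, K ≤ row.length) → (∃ row ∈ m, row.length = K) →
    pyTranspose m = (List.range K).map (fun c => m.map (fun row => row.getD c 0)) := by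
  intro K
  induction K with
  | zero =>
    intro m hm h1 h2
    obtain ⟨row, hrow, hlen⟩ := h2
    rw [pyTranspose_eq]
    rw [if_pos (Or.inr ?_)]
    · simp
    · simp only [List.any_eq_true]
      exact ⟨row, hrow, by simp [List.length_eq_zero_iff.mp hlen]⟩
  | succ K ihK =>
    intro m hm h1 h2
    have hne : ∀ row ∈ m, row ≠ [] := by
      intro row hr hcon
      have := h1 row hr
      simp [hcon] at this
    have hcond : ¬(m = [] ∨ (m.any (fun r => r.isEmpty)) = true) := by
      rintro (rfl | hany)
      · exact hm rfl
      · obtain ⟨row, hr, hE⟩ := List.any_eq_true.mp hany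
        exact hne row hr (List.isEmpty_iff.mp hE)
    rw [pyTranspose_eq, if_neg hcond]
    rw [List.range_succ_eq_map, List.map_cons, List.map_map]
    congr 1
    · apply List.map_congr_left
      intro row hr
      obtain ⟨a, as, rfl⟩ := List.exists_cons_of_ne_nil (hne row hr)
      simp
    · rw [ihK (m.map (fun r => r.tail)) (by simpa using hm) ?_ ?_]
      · apply List.map_congr_left
        intro c _
        rw [List.map_map]
        apply List.map_congr_left
        intro row hr
        obtain ⟨a, as, rfl⟩ := List.exists_cons_of_ne_nil (hne row hr)
        simp
      · intro row hr
        obtain ⟨row0, hr0, rfl⟩ := List.mem_map.mp hr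
        have := h1 row0 hr0
        simp only [List.length_tail]
        omega
      · obtain ⟨row0, hr0, hlen⟩ := h2
        exact ⟨row0.tail, List.mem_map_of_mem hr0, by simp [List.length_tail, hlen]⟩

theorem map_eq_range_getD {α β : Type} (m : List α) (f : α → β) (d : α) :
    m.map f = (List.range m.length).map (fun i => f (m.getD i d)) := by
  apply List.ext_getElem
  · simp
  · intro i h1i h2i
    simp only [List.getElem_map, List.getElem_range]
    rw [List.getD_eq_getElem m d (by simpa using h1i)]

theorem mem_le_sum (a : Nat) (l : List Nat) (h : a ∈ l) : a ≤ l.sum := by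
  induction l with
  | nil => cases h
  | cons x xs ih =>
    rcases List.mem_cons.mp h with rfl | h'
    · simp
    · have := ih h'
      simp only [List.sum_cons]
      omega

-- the transposed matrix A starts from IS the full window in orientation 0
theorem top_view (m : List (List Int)) (hm : m ≠ []) (K : Nat)
    (h1 : ∀ row ∈ m, K ≤ row.length) (h2 : ∃ row ∈ m, row.length = K) :
    pyTranspose m = view m 0 0 ((m.length : Int) - 1) 0 ((K : Int) - 1) := by
  rw [transpose_cols K m hm h1 h2]
  have e1 : upr 0 ((K : Int) - 1) = (List.range K).map (fun c : Nat => (c : Int)) := by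
    unfold upr
    rw [show ((K : Int) - 1 + 1) = (K : Int) by ring, PySem.List.pyRange_one,
      show (((K : Int)) - 0).toNat = K by omega]
    apply List.map_congr_left
    intro k _
    omega
  have e2 : upr 0 ((m.length : Int) - 1) =
      (List.range m.length).map (fun i : Nat => (i : Int)) := by
    unfold upr
    rw [show ((m.length : Int) - 1 + 1) = (m.length : Int) by ring, PySem.List.pyRange_one,
      show (((m.length : Int)) - 0).toNat = m.length by omega]
    apply List.map_congr_left
    intro k _
    omega
  rw [view0, e1, e2, List.map_map]
  apply List.map_congr_left
  intro c _
  simp only [Function.comp_def, List.map_map]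
  rw [map_eq_range_getD m (fun row => row.getD c 0) []]
  apply List.map_congr_left
  intro i _
  simp only [pyGetIJ, PySem.List.pyGetD_natCast]

-- ===== VERDICT (by name: the statement is the Claim_ definition above) =====
theorem matrix_counterclockwise_spec : Claim_equal_matrix_counterclockwise := by
  intro matrix _
  unfold Spec_matrix_counterclockwise
  by_cases hm : matrix = []
  · subst hm
    simp [matrix_counterclockwise, matrix_counterclockwise_alt, pyTranspose_nil, gLoop_nil]
  · have hxs : matrix.map (fun row : List Int => (row.length : Int)) ≠ [] := by
      simpa using hm
    obtain ⟨k', hk'⟩ : ∃ k', PySem.List.min?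
        (matrix.map (fun row : List Int => (row.length : Int))) (fun x => x) = some k' := by
      rcases h : PySem.List.min?
          (matrix.map (fun row : List Int => (row.length : Int))) (fun x => x) with _ | k'
      · exact absurd ((PySem.List.min?_eq_none_iff _ _).mp h) hxs
      · exact ⟨k', rfl⟩
    obtain ⟨row0, hrow0, hkrow⟩ := List.mem_map.mp (PySem.List.min?_mem hk')
    have hkK : k' = (row0.length : Int) := hkrow.symm
    have h1 : ∀ row ∈ matrix, row0.length ≤ row.length := by
      intro row hr
      have hmin := PySem.List.min?_isMin hk' _
        (List.mem_map_of_mem (l := matrix) (f := fun row : List Int => (row.length : Int)) hr)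
      simp only [hkK] at hmin
      exact_mod_cast hmin
    have h2 : ∃ row ∈ matrix, row.length = row0.length := ⟨row0, hrow0, rfl⟩
    have hKsum : row0.length ≤ (matrix.map List.length).sum :=
      mem_le_sum _ _ (List.mem_map_of_mem hrow0)
    unfold matrix_counterclockwise matrix_counterclockwise_alt
    rw [top_view matrix hm row0.length h1 h2,
      if_neg (by simp [hm] : ¬(matrix.isEmpty = true))]
    simp only [hk', Option.getD_some, hkK]
    rw [bLoop_eq_gLoop matrix (matrix.length + (matrix.map List.length).sum + 1)
      (((matrix.length : Int) + (row0.length : Int)).toNat + 1)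
      0 ((matrix.length : Int) - 1) 0 ((row0.length : Int) - 1) 0 [] (by simp)
      (by omega) (by omega)]
    simp
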